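-- pv_equiv track=rewrite | github.com/Pairyk/Programming-Principles-2 | practice_3/ejudge_3/String_calculator.py | parse_expression
-- ===== SOURCE A (Python) =====
-- WORD_TO_DIGIT = {
--     "ONE": '1', "TWO": '2', "THR": '3', "FOU": '4', "FIV": '5',
--     "SIX": '6', "SEV": '7', "EIG": '8', "NIN": '9', "ZER": '0'
-- }
--
-- OPERATORS = {'+', '-', '*', '/'}
--
-- def parse_expression(exp):
--     """Convert word-based expression to numeric format."""
--     numeric = ""
--     operator = None
--
--     # Process in chunks of 3 characters
--     i = 0
--     while i < len(exp):
--         chunk = exp[i:i+3]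
--
--         if chunk in WORD_TO_DIGIT:
--             numeric += WORD_TO_DIGIT[chunk]
--             i += 3
--         elif exp[i] in OPERATORS:
--             operator = exp[i]
--             numeric += exp[i]
--             i += 1
--         else:
--             i += 1
--
--     return numeric, operator
-- ===== SOURCE B (Python) =====
-- WORD_TO_DIGIT = {
--     "ONE": '1', "TWO": '2', "THR": '3', "FOU": '4', "FIV": '5',
--     "SIX": '6', "SEV": '7', "EIG": '8', "NIN": '9', "ZER": '0'
-- }
--
-- OPERATORS = {'+', '-', '*', '/'}
--
-- def parse_expression(exp):
--     """Convert word-based expression to numeric format (streaming sliding-window version)."""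
--     out = []
--     buf = ""
--     for ch in exp:
--         buf += ch
--         if len(buf) == 3:
--             if buf in WORD_TO_DIGIT:
--                 out.append(WORD_TO_DIGIT[buf])
--                 buf = ""
--             else:
--                 if buf[0] in OPERATORS:
--                     out.append(buf[0])
--                 buf = buf[1:]
--     for ch in buf:
--         if ch in OPERATORS:
--             out.append(ch)
--     operator = next((c for c in reversed(out) if c in OPERATORS), None)
--     return ''.join(out), operator
-- ===== Notes on version B (the rewrite author's own statement) =====
-- stated objective: alternative
-- what changed: Replaces A's index-based while-loop that re-slices exp[i:i+3] and tracks the operator in a loop variable by a streaming for-loop over the characters with a 3-char sliding-window buffer, a flush pass for the leftover buffer, and a post-hoc reversed search for the last operator.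
import Mathlib
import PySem

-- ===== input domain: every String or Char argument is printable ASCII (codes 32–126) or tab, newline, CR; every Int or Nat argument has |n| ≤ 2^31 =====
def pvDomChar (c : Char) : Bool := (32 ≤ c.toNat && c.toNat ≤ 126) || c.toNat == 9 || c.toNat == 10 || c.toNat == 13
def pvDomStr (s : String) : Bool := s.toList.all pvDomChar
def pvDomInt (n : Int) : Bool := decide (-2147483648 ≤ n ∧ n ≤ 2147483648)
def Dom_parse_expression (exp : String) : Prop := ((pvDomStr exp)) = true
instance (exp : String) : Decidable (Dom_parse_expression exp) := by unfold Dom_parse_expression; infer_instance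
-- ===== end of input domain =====

-- B replaces A's index-and-slice while-loop by a streaming sliding-window scan with a post-hoc
-- last-operator search (objective: alternative decomposition, same linear cost).

-- shared module constants (WORD_TO_DIGIT, OPERATORS); a 1-char Python string is represented as Char
def pvWordToDigit : PySem.Dict (List Char) Char :=
  PySem.Dict.ofList
    [ (['O','N','E'], '1'), (['T','W','O'], '2'), (['T','H','R'], '3'), (['F','O','U'], '4'),
      (['F','I','V'], '5'), (['S','I','X'], '6'), (['S','E','V'], '7'), (['E','I','G'], '8'),
      (['N','I','N'], '9'), (['Z','E','R'], '0') ]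

def pvOperators : List Char := ['+', '-', '*', '/']

def pvIsOp (c : Char) : Bool := pvOperators.contains c

-- ===== PORT A =====
-- A's while-loop: index i, chunk = exp[i:i+3], accumulators numeric / operator
def parseLoopA (cs : List Char) (numeric : List Char) (operator : Option Char) (i : Nat) :
    List Char × Option Char :=
  if h : i < cs.length then
    match pvWordToDigit.get? (PySem.List.slice cs (some (i : Int)) (some ((i : Int) + 3))) with
    | some d => parseLoopA cs (numeric ++ [d]) operator (i + 3)
    | none =>
      if pvIsOp cs[i] then parseLoopA cs (numeric ++ [cs[i]]) (some cs[i]) (i + 1)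
      else parseLoopA cs numeric operator (i + 1)
  else (numeric, operator)
termination_by cs.length - i

def parse_expression (exp : String) : String × Option String :=
  let r := parseLoopA exp.toList [] none 0
  (String.mk r.1, r.2.map (fun c => String.mk [c]))

-- ===== PORT B =====
-- B's for-loop over the characters: sliding 3-char window buf, output list out;
-- then the flush loop over the leftover buf, and the last-operator search on out.
def scanB (out : List Char) (buf : List Char) : List Char → List Char
  | [] => buf.foldl (fun o ch => if pvIsOp ch then o ++ [ch] else o) out
  | ch :: rest =>
    let buf' := buf ++ [ch]
    if buf'.length = 3 then
      match pvWordToDigit.get? buf' with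
      | some d => scanB (out ++ [d]) [] rest
      | none =>
        scanB (if pvIsOp (PySem.List.pyGetD buf' 0 ' ') then out ++ [PySem.List.pyGetD buf' 0 ' '] else out)
          (PySem.List.slice buf' (some 1) none) rest
    else scanB out buf' rest

def parse_expression_alt (exp : String) : String × Option String :=
  let out := scanB [] [] exp.toList
  (String.mk out, (out.reverse.find? pvIsOp).map (fun c => String.mk [c]))

-- ===== PRECONDITION & SPEC =====
def Spec_parse_expression (exp : String) (out : String × Option String) : Prop := out = parse_expression_alt exp
instance (exp : String) (out : String × Option String) : Decidable (Spec_parse_expression exp out) := by unfold Spec_parse_expression; infer_instance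

-- ===== CLAIM (what is proved, stated in full; the proofs are below) =====
def Claim_equal_parse_expression : Prop := ∀ (exp : String), Dom_parse_expression exp → Spec_parse_expression exp (parse_expression exp)

-- ===== LEMMAS AND PROOFS =====

-- common recursive description of the emitted characters
def pvTok : List Char → List Char
  | [] => []
  | c :: rest =>
    match pvWordToDigit.get? ((c :: rest).take 3) with
    | some d => d :: pvTok ((c :: rest).drop 3)
    | none => if pvIsOp c then c :: pvTok rest else pvTok rest
termination_by s => s.length
decreasing_by all_goals (simp; try omega)

def pvLastOp (l : List Char) : Option Char := l.reverse.find? pvIsOp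

lemma pvWD_items :
    pvWordToDigit.items =
    [ (['O','N','E'], '1'), (['T','W','O'], '2'), (['T','H','R'], '3'), (['F','O','U'], '4'),
      (['F','I','V'], '5'), (['S','I','X'], '6'), (['S','E','V'], '7'), (['E','I','G'], '8'),
      (['N','I','N'], '9'), (['Z','E','R'], '0') ] := by decide

lemma pvWD_key_len {t : List Char} {d : Char} (h : pvWordToDigit.get? t = some d) : t.length = 3 := by
  have hm := PySem.Dict.mem_items_of_get?_eq_some pvWordToDigit h
  rw [pvWD_items] at hm
  simp at hm
  rcases hm with ⟨rfl, rfl⟩|⟨rfl, rfl⟩|⟨rfl, rfl⟩|⟨rfl, rfl⟩|⟨rfl, rfl⟩|⟨rfl, rfl⟩|⟨rfl, rfl⟩|⟨rfl, rfl⟩|⟨rfl, rfl⟩|⟨rfl, rfl⟩ <;> rfl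

lemma pvWD_val_not_op {t : List Char} {d : Char} (h : pvWordToDigit.get? t = some d) : pvIsOp d = false := by
  have hm := PySem.Dict.mem_items_of_get?_eq_some pvWordToDigit h
  rw [pvWD_items] at hm
  simp at hm
  rcases hm with ⟨rfl, rfl⟩|⟨rfl, rfl⟩|⟨rfl, rfl⟩|⟨rfl, rfl⟩|⟨rfl, rfl⟩|⟨rfl, rfl⟩|⟨rfl, rfl⟩|⟨rfl, rfl⟩|⟨rfl, rfl⟩|⟨rfl, rfl⟩ <;> rfl

lemma pvWD_short {t : List Char} (h : t.length ≤ 2) : pvWordToDigit.get? t = none := by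
  cases hg : pvWordToDigit.get? t with
  | none => rfl
  | some d => have := pvWD_key_len hg; omega

lemma pvLastOp_cons (x : Char) (l : List Char) :
    pvLastOp (x :: l) = Option.or (pvLastOp l) (if pvIsOp x then some x else none) := by
  by_cases hx : pvIsOp x <;>
    cases hl : l.reverse.find? pvIsOp <;>
      simp [pvLastOp, List.find?_append, hl, hx, Option.or]

lemma pvTok_small : ∀ (buf : List Char), buf.length ≤ 2 → pvTok buf = buf.filter pvIsOp := by
  intro buf h
  match buf with
  | [] => simp [pvTok]
  | [a] =>
    rw [pvTok]
    rw [pvWD_short (by simp)]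
    by_cases ha : pvIsOp a <;> simp [ha, pvTok]
  | [a, b] =>
    rw [pvTok]
    rw [pvWD_short (by simp)]
    have hb := pvTok_small [b] (by simp)
    by_cases ha : pvIsOp a <;> simp [ha, hb]
  | a :: b :: c :: t => simp at h

lemma loopA_eq (cs : List Char) :
    ∀ (n i : Nat) (numeric : List Char) (operator : Option Char), cs.length - i ≤ n →
      parseLoopA cs numeric operator i =
        (numeric ++ pvTok (cs.drop i), Option.or (pvLastOp (pvTok (cs.drop i))) operator) := by
  intro n
  induction n with
  | zero =>
    intro i numeric operator hle
    have hge : cs.length ≤ i := by omega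
    rw [parseLoopA, dif_neg (by omega)]
    simp [List.drop_eq_nil_of_le hge, pvTok, pvLastOp, Option.or]
  | succ n ih =>
    intro i numeric operator hle
    by_cases h : i < cs.length
    · have hcast : ((i : Int) + 3) = (((i + 3 : Nat) : Int)) := by push_cast; ring
      have hsl : PySem.List.slice cs (some (i : Int)) (some ((i : Int) + 3)) = (cs.drop i).take 3 := by
        rw [hcast, PySem.List.slice_natCast]
        congr 1
        omega
      have hdi : cs.drop i = cs[i] :: cs.drop (i + 1) := List.drop_eq_getElem_cons h
      rw [parseLoopA, dif_pos h, hsl]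
      cases hg : pvWordToDigit.get? ((cs.drop i).take 3) with
      | some d =>
        show parseLoopA cs (numeric ++ [d]) operator (i + 3) = _
        rw [ih (i + 3) (numeric ++ [d]) operator (by omega)]
        have hd3 : cs.drop (i + 3) = (cs.drop i).drop 3 := by
          rw [List.drop_drop]
        rw [hd3]
        conv_rhs => rw [hdi]
        rw [pvTok]
        rw [show (cs[i] :: cs.drop (i + 1)).take 3 = (cs.drop i).take 3 from by rw [hdi],
            show (cs[i] :: cs.drop (i + 1)).drop 3 = (cs.drop i).drop 3 from by rw [hdi], hg]
        rw [pvLastOp_cons, pvWD_val_not_op hg]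
        simp only [if_neg Bool.false_ne_true, List.append_assoc, List.singleton_append,
          Option.or_none]
      | none =>
        show (if pvIsOp cs[i] = true then parseLoopA cs (numeric ++ [cs[i]]) (some cs[i]) (i + 1)
              else parseLoopA cs numeric operator (i + 1)) = _
        have htk : pvTok (cs.drop i) =
            if pvIsOp cs[i] then cs[i] :: pvTok (cs.drop (i + 1)) else pvTok (cs.drop (i + 1)) := by
          conv_lhs => rw [hdi, pvTok]
          rw [show (cs[i] :: cs.drop (i + 1)).take 3 = (cs.drop i).take 3 from by rw [hdi], hg]
        by_cases hop : pvIsOp cs[i]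
        · rw [if_pos hop]
          rw [ih (i + 1) (numeric ++ [cs[i]]) (some cs[i]) (by omega)]
          rw [htk, if_pos hop, pvLastOp_cons, if_pos hop]
          cases pvLastOp (pvTok (cs.drop (i + 1))) <;> simp [Option.or]
        · rw [if_neg hop]
          rw [ih (i + 1) numeric operator (by omega)]
          rw [htk, if_neg hop]
    · rw [parseLoopA, dif_neg h]
      simp [List.drop_eq_nil_of_le (by omega : cs.length ≤ i), pvTok, pvLastOp, Option.or]

lemma scanB_eq : ∀ (s out buf : List Char), buf.length ≤ 2 → scanB out buf s = out ++ pvTok (buf ++ s) := by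
  intro s
  induction s with
  | nil =>
    intro out buf hb
    rw [scanB]
    rw [List.append_nil, pvTok_small buf hb]
    simpa using PySem.List.foldl_append_if pvIsOp id buf out
  | cons ch rest ih =>
    intro out buf hb
    match buf with
    | [] =>
      rw [scanB]
      simp only [List.nil_append, List.length_cons, List.length_nil]
      rw [if_neg (by omega)]
      exact ih out [ch] (by simp)
    | [a] =>
      rw [scanB]
      simp only [List.cons_append, List.nil_append, List.length_cons, List.length_nil]
      rw [if_neg (by omega)]
      have := ih out [a, ch] (by simp)
      simpa using this
    | [a, b] =>
      rw [scanB]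
      simp only [List.cons_append, List.nil_append, List.length_cons, List.length_nil]
      simp only [if_true]
      cases hg : pvWordToDigit.get? [a, b, ch] with
      | some d =>
        show scanB (out ++ [d]) [] rest = _
        rw [ih (out ++ [d]) [] (by simp)]
        conv_rhs => rw [pvTok]
        rw [show (a :: (b :: ch :: rest)).take 3 = [a, b, ch] from rfl, hg]
        simp
      | none =>
        show scanB (if pvIsOp (PySem.List.pyGetD [a, b, ch] 0 ' ') = true
              then out ++ [PySem.List.pyGetD [a, b, ch] 0 ' '] else out)
            (PySem.List.slice [a, b, ch] (some 1) none) rest = _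
        rw [show PySem.List.pyGetD [a, b, ch] 0 ' ' = a from rfl,
            show PySem.List.slice [a, b, ch] (some 1) none = [b, ch] from by
              rw [PySem.List.slice_from_one]; rfl]
        rw [ih _ [b, ch] (by simp)]
        conv_rhs => rw [pvTok]
        rw [show (a :: (b :: ch :: rest)).take 3 = [a, b, ch] from rfl, hg]
        by_cases ha : pvIsOp a <;> simp [ha]
    | a :: b :: c :: t => simp at hb

-- ===== VERDICT (by name: the statement is the Claim_ definition above) =====
theorem parse_expression_spec : Claim_equal_parse_expression := by
  intro exp _
  unfold Spec_parse_expression parse_expression parse_expression_alt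
  rw [loopA_eq exp.toList (exp.toList.length - 0) 0 [] none (le_refl _)]
  rw [scanB_eq exp.toList [] [] (by simp)]
  simp only [List.drop_zero, List.nil_append, Option.or_none]
  rfl
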